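-- pv_equiv track=rewrite | github.com/Ellis14N/acled-fetcher | _scripts/unhcr_fetch.py | aggregate_population_by_origin
-- ===== SOURCE A (Python) =====
-- from collections import defaultdict
--
-- def to_int(value):
--     """Safely convert API values to integers."""
--     try:
--         return int(value or 0)
--     except (TypeError, ValueError):
--         return 0
--
-- def normalize_origin_name(origin):
--     text = str(origin or "").strip()
--     return "Unknown/Unspecified" if not text or text == "-" else text
--
-- def aggregate_population_by_origin(records):
--     """
--     Aggregate displacement population by country of origin.
--
--     Returns:
--         dict: Summary totals and breakdown by origin
--     """
--     totals = {
--         "refugees": 0,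
--         "asylum_seekers": 0,
--         "idps": 0,
--         "stateless": 0,
--         "oip": 0
--     }
--
--     by_origin = defaultdict(lambda: {
--         "refugees": 0,
--         "asylum_seekers": 0,
--         "idps": 0,
--         "stateless": 0,
--         "oip": 0,
--         "total": 0
--     })
--
--     for record in records:
--         origin = normalize_origin_name(record.get("coo_name", "Unknown"))
--
--         refugees = to_int(record.get("refugees", 0))
--         asylum_seekers = to_int(record.get("asylum_seekers", 0))
--         idps = to_int(record.get("idps", 0))
--         stateless = to_int(record.get("stateless", 0))
--         oip = to_int(record.get("oip", 0))
--
--         totals["refugees"] += refugees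
--         totals["asylum_seekers"] += asylum_seekers
--         totals["idps"] += idps
--         totals["stateless"] += stateless
--         totals["oip"] += oip
--
--         by_origin[origin]["refugees"] += refugees
--         by_origin[origin]["asylum_seekers"] += asylum_seekers
--         by_origin[origin]["idps"] += idps
--         by_origin[origin]["stateless"] += stateless
--         by_origin[origin]["oip"] += oip
--         by_origin[origin]["total"] += refugees + asylum_seekers + idps + stateless + oip
--
--     return totals, dict(by_origin)
-- ===== SOURCE B (Python) =====
-- def to_int(value):
--     """Safely convert API values to integers."""
--     try:
--         return int(value or 0)
--     except (TypeError, ValueError):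
--         return 0
--
-- def normalize_origin_name(origin):
--     text = str(origin or "").strip()
--     return "Unknown/Unspecified" if not text or text == "-" else text
--
-- FIELDS = ("refugees", "asylum_seekers", "idps", "stateless", "oip")
--
-- def group_sums(recs):
--     sums = {field: sum(to_int(r.get(field, 0)) for r in recs) for field in FIELDS}
--     sums["total"] = sum(sums.values())
--     return sums
--
-- def aggregate_population_by_origin(records):
--     keyed = [(normalize_origin_name(r.get("coo_name", "Unknown")), r) for r in records]
--     groups = {}
--     for origin, record in keyed:
--         groups.setdefault(origin, []).append(record)
--     by_origin = {origin: group_sums(recs) for origin, recs in groups.items()}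
--     totals = {field: sum(s[field] for s in by_origin.values()) for field in FIELDS}
--     return totals, by_origin
-- ===== Notes on version B (the rewrite author's own statement) =====
-- stated objective: alternative
-- what changed: A accumulates totals and per-origin dicts record-by-record in one pass with a defaultdict; B first groups the records by normalized origin, then computes each origin's five field sums and total from its group via comprehensions and derives the global totals from the per-group sums.
import Mathlib
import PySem

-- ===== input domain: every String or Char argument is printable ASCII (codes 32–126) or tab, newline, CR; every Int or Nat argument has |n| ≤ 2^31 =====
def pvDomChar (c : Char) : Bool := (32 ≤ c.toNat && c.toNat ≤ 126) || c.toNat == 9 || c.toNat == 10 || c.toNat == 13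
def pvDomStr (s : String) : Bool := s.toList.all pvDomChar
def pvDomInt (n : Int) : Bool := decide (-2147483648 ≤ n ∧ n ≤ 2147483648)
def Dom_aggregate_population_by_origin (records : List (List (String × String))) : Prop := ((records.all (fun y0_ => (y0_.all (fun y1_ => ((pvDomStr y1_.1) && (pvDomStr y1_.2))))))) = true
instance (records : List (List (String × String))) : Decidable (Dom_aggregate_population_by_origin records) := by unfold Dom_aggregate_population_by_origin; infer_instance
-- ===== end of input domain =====

-- B is a two-pass re-implementation (group records by origin, then sum each group);
-- equivalence of the RETURN values with A's single-pass dict accumulation is proved below.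

-- shared helpers of both Pythons (to_int / normalize_origin_name / record.get)
-- record.get(k, default): first match in the association list
def pvGet (record : List (String × String)) (k : String) : Option String :=
  (record.find? (fun p => p.1 == k)).map (·.2)

-- to_int(v) where v is either the absent default 0 (none) or the string value
def pvToInt (v : Option String) : Int :=
  match v with
  | none => 0                -- to_int(0) = 0
  | some s => if s = "" then 0 else (PySem.Int.ofStr? s).getD 0   -- int(s or 0); ValueError -> 0

def pvNorm (origin : String) : String :=
  let text := PySem.Str.strip origin    -- str(origin or "").strip(): identical on strings
  if text = "" || text = "-" then "Unknown/Unspecified" else text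

def pvKey (record : List (String × String)) : String :=
  pvNorm ((pvGet record "coo_name").getD "Unknown")

-- ===== PORT A =====
def pvTotals0 : PySem.Dict String Int :=
  PySem.Dict.ofList [("refugees", 0), ("asylum_seekers", 0), ("idps", 0), ("stateless", 0), ("oip", 0)]

-- the defaultdict default value
def pvDefault6 : PySem.Dict String Int :=
  PySem.Dict.ofList [("refugees", 0), ("asylum_seekers", 0), ("idps", 0), ("stateless", 0), ("oip", 0), ("total", 0)]

-- loop body, split into its two independent accumulators (totals / by_origin).
def pvStepT (totals : PySem.Dict String Int) (record : List (String × String)) :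
    PySem.Dict String Int :=
  ((((totals.modify "refugees" 0 (· + pvToInt (pvGet record "refugees"))).modify
      "asylum_seekers" 0 (· + pvToInt (pvGet record "asylum_seekers"))).modify
      "idps" 0 (· + pvToInt (pvGet record "idps"))).modify
      "stateless" 0 (· + pvToInt (pvGet record "stateless"))).modify
      "oip" 0 (· + pvToInt (pvGet record "oip"))

-- the six in-place updates of the defaultdict entry for this record's origin
def pvUpd (cur : PySem.Dict String Int) (record : List (String × String)) :
    PySem.Dict String Int :=
  (((((cur.modify "refugees" 0 (· + pvToInt (pvGet record "refugees"))).modify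
      "asylum_seekers" 0 (· + pvToInt (pvGet record "asylum_seekers"))).modify
      "idps" 0 (· + pvToInt (pvGet record "idps"))).modify
      "stateless" 0 (· + pvToInt (pvGet record "stateless"))).modify
      "oip" 0 (· + pvToInt (pvGet record "oip"))).modify
      "total" 0 (· + (pvToInt (pvGet record "refugees") + pvToInt (pvGet record "asylum_seekers") +
        pvToInt (pvGet record "idps") + pvToInt (pvGet record "stateless") + pvToInt (pvGet record "oip")))

-- Python's repeated `by_origin[origin][f] += v` statements mutate the defaultdict entry
-- in place; fetching it once, applying the six updates and writing it back at the same
-- key is exact (insert keeps the position of an existing key).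
def pvStepB (by_origin : PySem.Dict String (PySem.Dict String Int))
    (record : List (String × String)) : PySem.Dict String (PySem.Dict String Int) :=
  by_origin.insert (pvKey record) (pvUpd (by_origin.getD (pvKey record) pvDefault6) record)

def pvStepA (st : PySem.Dict String Int × PySem.Dict String (PySem.Dict String Int))
    (record : List (String × String)) :
    PySem.Dict String Int × PySem.Dict String (PySem.Dict String Int) :=
  (pvStepT st.1 record, pvStepB st.2 record)

def aggregate_population_by_origin (records : List (List (String × String))) :
    (List (String × Int)) × (List (String × List (String × Int))) :=
  let st := records.foldl pvStepA (pvTotals0, PySem.Dict.empty)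
  (st.1.items, st.2.items.map (fun p => (p.1, p.2.items)))

-- ===== PORT B =====
def pvFields : List String := ["refugees", "asylum_seekers", "idps", "stateless", "oip"]

def pvGroupSums (recs : List (List (String × String))) : List (String × Int) :=
  let sums := pvFields.map (fun field => (field, (recs.map (fun r => pvToInt (pvGet r field))).sum))
  sums ++ [("total", (sums.map (·.2)).sum)]

def aggregate_population_by_origin_alt (records : List (List (String × String))) :
    (List (String × Int)) × (List (String × List (String × Int))) :=
  let keyed := records.map (fun r => (pvKey r, r))
  -- groups.setdefault(origin, []).append(record) appends record to the entry at origin,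
  -- creating it as [] first: exactly Dict.modify origin [] (· ++ [record])
  let groups := keyed.foldl
    (fun (d : PySem.Dict String (List (List (String × String)))) p => d.modify p.1 [] (· ++ [p.2]))
    PySem.Dict.empty
  let by_origin := groups.items.map (fun p => (p.1, pvGroupSums p.2))
  let totals := pvFields.map (fun field =>
    (field, (by_origin.map (fun q => (((q.2.find? (fun s => s.1 == field)).map (·.2)).getD 0))).sum))
  (totals, by_origin)

-- ===== PRECONDITION & SPEC =====
def Spec_aggregate_population_by_origin (records : List (List (String × String))) (out : (List (String × Int)) × (List (String × List (String × Int)))) : Prop := out = aggregate_population_by_origin_alt records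
instance (records : List (List (String × String))) (out : (List (String × Int)) × (List (String × List (String × Int)))) : Decidable (Spec_aggregate_population_by_origin records out) := by unfold Spec_aggregate_population_by_origin; infer_instance

-- ===== CLAIM (what is proved, stated in full; the proofs are below) =====
def Claim_equal_aggregate_population_by_origin : Prop := ∀ (records : List (List (String × String))), Dom_aggregate_population_by_origin records → Spec_aggregate_population_by_origin records (aggregate_population_by_origin records)

-- ===== LEMMAS AND PROOFS =====

-- field value of one record / field sum over a list of records
def pvF (field : String) (r : List (String × String)) : Int := pvToInt (pvGet r field)
def pvS (field : String) (l : List (List (String × String))) : Int := (l.map (pvF field)).sum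

-- dict-literal shorthands for the two fixed-key dicts of A
def pvMk5 (a b c d e : Int) : PySem.Dict String Int :=
  PySem.Dict.mk [("refugees", a), ("asylum_seekers", b), ("idps", c), ("stateless", d), ("oip", e)]
def pvMk6 (a b c d e f : Int) : PySem.Dict String Int :=
  PySem.Dict.mk [("refugees", a), ("asylum_seekers", b), ("idps", c), ("stateless", d), ("oip", e), ("total", f)]

lemma pvS_nil (field : String) : pvS field [] = 0 := rfl

lemma pvS_cons (field : String) (r : List (String × String)) (l : List (List (String × String))) :
    pvS field (r :: l) = pvF field r + pvS field l := by
  simp [pvS]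

lemma pvStepT_mk5 (a b c d e : Int) (r : List (String × String)) :
    pvStepT (pvMk5 a b c d e) r =
      pvMk5 (a + pvF "refugees" r) (b + pvF "asylum_seekers" r) (c + pvF "idps" r)
        (d + pvF "stateless" r) (e + pvF "oip" r) := rfl

lemma pvUpd_mk6 (a b c d e f : Int) (r : List (String × String)) :
    pvUpd (pvMk6 a b c d e f) r =
      pvMk6 (a + pvF "refugees" r) (b + pvF "asylum_seekers" r) (c + pvF "idps" r)
        (d + pvF "stateless" r) (e + pvF "oip" r)
        (f + (pvF "refugees" r + pvF "asylum_seekers" r + pvF "idps" r +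
              pvF "stateless" r + pvF "oip" r)) := rfl

lemma foldl_pvStepT (l : List (List (String × String))) :
    ∀ a b c d e : Int, l.foldl pvStepT (pvMk5 a b c d e) =
      pvMk5 (a + pvS "refugees" l) (b + pvS "asylum_seekers" l) (c + pvS "idps" l)
        (d + pvS "stateless" l) (e + pvS "oip" l) := by
  induction l with
  | nil => intro a b c d e; simp [pvS_nil]
  | cons r t ih =>
    intro a b c d e
    rw [List.foldl_cons, pvStepT_mk5, ih]
    simp [pvS_cons, add_assoc]

lemma foldl_pvUpd (l : List (List (String × String))) :
    ∀ a b c d e f : Int, l.foldl pvUpd (pvMk6 a b c d e f) =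
      pvMk6 (a + pvS "refugees" l) (b + pvS "asylum_seekers" l) (c + pvS "idps" l)
        (d + pvS "stateless" l) (e + pvS "oip" l)
        (f + (pvS "refugees" l + pvS "asylum_seekers" l + pvS "idps" l +
              pvS "stateless" l + pvS "oip" l)) := by
  induction l with
  | nil => intro a b c d e f; simp [pvS_nil]
  | cons r t ih =>
    intro a b c d e f
    rw [List.foldl_cons, pvUpd_mk6, ih]
    simp only [pvS_cons]
    ring_nf

lemma getD_foldl_pvStepB (l : List (List (String × String))) :
    ∀ (d : PySem.Dict String (PySem.Dict String Int)) (k : String),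
      (l.foldl pvStepB d).getD k pvDefault6 =
        (l.filter (fun r => pvKey r == k)).foldl pvUpd (d.getD k pvDefault6) := by
  induction l with
  | nil => intro d k; rfl
  | cons r t ih =>
    intro d k
    rw [List.foldl_cons]
    show (t.foldl pvStepB (pvStepB d r)).getD k pvDefault6 = _
    rw [ih]
    by_cases h : pvKey r = k
    · subst h
      simp only [List.filter_cons, beq_self_eq_true, if_pos]
      rw [List.foldl_cons]
      congr 1
      simp [pvStepB, PySem.Dict.getD_insert_self]
    · have hb : (pvKey r == k) = false := by simp [h]
      simp only [List.filter_cons, hb, Bool.false_eq_true, if_false]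
      congr 1
      show (d.insert (pvKey r) (pvUpd (d.getD (pvKey r) pvDefault6) r)).getD k pvDefault6 = _
      rw [PySem.Dict.getD_insert_of_ne]
      exact fun hk => h hk.symm

lemma keys_foldl_pvStepB (l : List (List (String × String))) :
    (l.foldl pvStepB PySem.Dict.empty).keys = PySem.Set.ofList (l.map pvKey) := by
  show (l.foldl (fun d r => d.insert (pvKey r) (pvUpd (d.getD (pvKey r) pvDefault6) r))
      PySem.Dict.empty).keys = _
  rw [PySem.Dict.keys_foldl_insert_key
    (key := pvKey) (f := fun d x => pvUpd (d.getD (pvKey x) pvDefault6) x)]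
  simp [PySem.Dict.keys_empty, PySem.Set.update_nil_left]

lemma nodup_keys_foldl_pvStepB (l : List (List (String × String))) :
    (l.foldl pvStepB PySem.Dict.empty).keys.Nodup := by
  show (l.foldl (fun d r => d.insert (pvKey r) (pvUpd (d.getD (pvKey r) pvDefault6) r))
      PySem.Dict.empty).keys.Nodup
  exact PySem.Dict.nodup_keys_foldl_insert_key l pvKey
    (fun d x => pvUpd (d.getD (pvKey x) pvDefault6) x) _ PySem.Dict.nodup_keys_empty

lemma inner_items_eq (recs : List (List (String × String))) :
    (recs.foldl pvUpd pvDefault6).items = pvGroupSums recs := by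
  rw [show pvDefault6 = pvMk6 0 0 0 0 0 0 from rfl, foldl_pvUpd]
  simp only [pvMk6, pvGroupSums, pvFields, List.map_cons, List.map_nil, List.sum_cons,
    List.sum_nil, pvS, zero_add, List.cons_append, List.nil_append]
  unfold pvF
  simp [add_assoc]

-- A's single loop with two independent accumulators is two loops
lemma foldl_pvStepA (records : List (List (String × String))) :
    records.foldl pvStepA (pvTotals0, PySem.Dict.empty) =
      (records.foldl pvStepT pvTotals0, records.foldl pvStepB PySem.Dict.empty) := by
  rw [show pvStepA = (fun (s : PySem.Dict String Int × PySem.Dict String (PySem.Dict String Int)) r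
      => (pvStepT s.1 r, pvStepB s.2 r)) from rfl]
  exact PySem.List.foldl_prod_mk pvStepT pvStepB records pvTotals0 PySem.Dict.empty

-- the canonical value both programs compute
def pvCanon (records : List (List (String × String))) :
    (List (String × Int)) × (List (String × List (String × Int))) :=
  ([("refugees", pvS "refugees" records), ("asylum_seekers", pvS "asylum_seekers" records),
    ("idps", pvS "idps" records), ("stateless", pvS "stateless" records),
    ("oip", pvS "oip" records)],
   (PySem.Set.ofList (records.map pvKey)).map
     (fun k => (k, pvGroupSums (records.filter (fun r => pvKey r == k)))))

lemma A_eq_canon (records : List (List (String × String))) :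
    aggregate_population_by_origin records = pvCanon records := by
  unfold aggregate_population_by_origin pvCanon
  rw [foldl_pvStepA]
  refine Prod.ext ?_ ?_
  · rw [show pvTotals0 = pvMk5 0 0 0 0 0 from rfl, foldl_pvStepT]
    simp [pvMk5]
  · show (records.foldl pvStepB PySem.Dict.empty).items.map (fun p => (p.1, p.2.items)) = _
    rw [PySem.Dict.items_eq_map_keys _ (nodup_keys_foldl_pvStepB records) pvDefault6,
      keys_foldl_pvStepB, List.map_map]
    simp only [Function.comp_def, getD_foldl_pvStepB, PySem.Dict.getD_empty, inner_items_eq]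

-- per-field lookup in a group's sums dict
lemma find_gs_refugees (recs : List (List (String × String))) :
    ((((pvGroupSums recs).find? (fun s => s.1 == "refugees")).map (·.2)).getD 0) =
      pvS "refugees" recs := rfl
lemma find_gs_asylum (recs : List (List (String × String))) :
    ((((pvGroupSums recs).find? (fun s => s.1 == "asylum_seekers")).map (·.2)).getD 0) =
      pvS "asylum_seekers" recs := rfl
lemma find_gs_idps (recs : List (List (String × String))) :
    ((((pvGroupSums recs).find? (fun s => s.1 == "idps")).map (·.2)).getD 0) =
      pvS "idps" recs := rfl
lemma find_gs_stateless (recs : List (List (String × String))) :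
    ((((pvGroupSums recs).find? (fun s => s.1 == "stateless")).map (·.2)).getD 0) =
      pvS "stateless" recs := rfl
lemma find_gs_oip (recs : List (List (String × String))) :
    ((((pvGroupSums recs).find? (fun s => s.1 == "oip")).map (·.2)).getD 0) =
      pvS "oip" recs := rfl

-- splitting a field sum along a Boolean predicate
lemma pvS_filter_split (field : String) (p : List (String × String) → Bool) :
    ∀ l : List (List (String × String)),
      pvS field (l.filter p) + pvS field (l.filter (fun r => !(p r))) = pvS field l := by
  intro l
  induction l with
  | nil => simp [pvS_nil]
  | cons r t ih =>
    by_cases h : p r = true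
    · simp [h, pvS_cons, ← ih]; ring
    · simp only [Bool.not_eq_true] at h
      simp [h, pvS_cons, ← ih]; ring

-- summing per-group field sums over all (distinct, covering) keys gives the global field sum
lemma partition_sum (field : String) :
    ∀ ks : List String, ks.Nodup →
      ∀ l : List (List (String × String)), (∀ r ∈ l, pvKey r ∈ ks) →
        (ks.map (fun k => pvS field (l.filter (fun r => pvKey r == k)))).sum = pvS field l := by
  intro ks
  induction ks with
  | nil =>
    intro _ l hcov
    obtain rfl : l = [] := by
      cases l with
      | nil => rfl
      | cons r t => exact absurd (hcov r (List.mem_cons_self ..)) (List.not_mem_nil)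
    simp [pvS_nil]
  | cons k ks ih =>
    intro hnd l hcov
    have hk : k ∉ ks := (List.nodup_cons.mp hnd).1
    have hnd' : ks.Nodup := (List.nodup_cons.mp hnd).2
    set l' := l.filter (fun r => !(pvKey r == k)) with hl'
    have htail : ∀ k' ∈ ks, l.filter (fun r => pvKey r == k') = l'.filter (fun r => pvKey r == k') := by
      intro k' hk'
      rw [hl', List.filter_filter]
      apply List.filter_congr
      intro r _
      by_cases h : pvKey r = k'
      · have hk'k : k' ≠ k := fun hh => hk (hh ▸ hk')
        simp [h, hk'k]
      · simp [h]
    rw [List.map_cons, List.sum_cons, List.map_congr_left (fun k' hk' => by rw [htail k' hk']),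
      ih hnd' l' ?_]
    · exact pvS_filter_split field (fun r => pvKey r == k) l
    · intro r hr
      have hrl : r ∈ l := List.mem_of_mem_filter hr
      have hne : pvKey r ≠ k := by simpa using List.of_mem_filter hr
      rcases List.mem_cons.mp (hcov r hrl) with h | h
      · exact absurd h hne
      · exact h

lemma B_core (records : List (List (String × String))) :
    ((pvFields.map (fun field => (field,
        ((((records.map (fun r => (pvKey r, r))).foldl
            (fun (d : PySem.Dict String (List (List (String × String)))) p =>
              d.modify p.1 [] (· ++ [p.2])) PySem.Dict.empty).items.map
            (fun p => (p.1, pvGroupSums p.2))).map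
          (fun q => (((q.2.find? (fun s => s.1 == field)).map (·.2)).getD 0))).sum))),
      ((records.map (fun r => (pvKey r, r))).foldl
          (fun (d : PySem.Dict String (List (List (String × String)))) p =>
            d.modify p.1 [] (· ++ [p.2])) PySem.Dict.empty).items.map
        (fun p => (p.1, pvGroupSums p.2)))
    = pvCanon records := by
  unfold pvCanon
  have hnodup : ((records.map (fun r => (pvKey r, r))).foldl
      (fun (d : PySem.Dict String (List (List (String × String)))) p =>
        d.modify p.1 [] (· ++ [p.2])) PySem.Dict.empty).keys.Nodup :=
    PySem.Dict.nodup_keys_foldl_modify_key _ Prod.fst [] _ _ PySem.Dict.nodup_keys_empty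
  have hkeys : ((records.map (fun r => (pvKey r, r))).foldl
      (fun (d : PySem.Dict String (List (List (String × String)))) p =>
        d.modify p.1 [] (· ++ [p.2])) PySem.Dict.empty).keys
      = PySem.Set.ofList (records.map pvKey) := by
    rw [PySem.Dict.keys_foldl_modify_key]
    simp [PySem.Set.update_nil_left, List.map_map, Function.comp_def]
  have hget : ∀ k, ((records.map (fun r => (pvKey r, r))).foldl
      (fun (d : PySem.Dict String (List (List (String × String)))) p =>
        d.modify p.1 [] (· ++ [p.2])) PySem.Dict.empty).getD k []
      = records.filter (fun r => pvKey r == k) := by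
    intro k
    rw [PySem.Dict.getD_foldl_modify_append]
    simp [List.filter_map, List.map_map, Function.comp_def]
  have hitems : ((records.map (fun r => (pvKey r, r))).foldl
      (fun (d : PySem.Dict String (List (List (String × String)))) p =>
        d.modify p.1 [] (· ++ [p.2])) PySem.Dict.empty).items
      = (PySem.Set.ofList (records.map pvKey)).map
          (fun k => (k, records.filter (fun r => pvKey r == k))) := by
    rw [PySem.Dict.items_eq_map_keys _ hnodup [], hkeys]
    exact List.map_congr_left fun k _ => by rw [hget]
  rw [hitems, List.map_map]
  have hcov : ∀ r ∈ records, pvKey r ∈ PySem.Set.ofList (records.map pvKey) := by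
    intro r hr
    rw [PySem.Set.mem_ofList]
    exact List.mem_map_of_mem hr
  refine Prod.ext ?_ rfl
  simp only [pvFields, List.map_cons, List.map_nil, List.map_map, Function.comp_def,
    find_gs_refugees, find_gs_asylum, find_gs_idps, find_gs_stateless, find_gs_oip]
  rw [partition_sum "refugees" _ (PySem.Set.nodup_ofList _) records hcov,
    partition_sum "asylum_seekers" _ (PySem.Set.nodup_ofList _) records hcov,
    partition_sum "idps" _ (PySem.Set.nodup_ofList _) records hcov,
    partition_sum "stateless" _ (PySem.Set.nodup_ofList _) records hcov,
    partition_sum "oip" _ (PySem.Set.nodup_ofList _) records hcov]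

lemma B_eq_canon (records : List (List (String × String))) :
    aggregate_population_by_origin_alt records = pvCanon records := by
  unfold aggregate_population_by_origin_alt
  exact B_core records

-- ===== VERDICT (by name: the statement is the Claim_ definition above) =====
theorem aggregate_population_by_origin_spec : Claim_equal_aggregate_population_by_origin := by
  intro records _
  unfold Spec_aggregate_population_by_origin
  rw [A_eq_canon, B_eq_canon]
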